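-- pv_equiv track=rewrite | github.com/electron/electron | script/check-patches.py | compare_diffs
-- ===== SOURCE A (Python) =====
-- def compare_diffs(a, b):
--   """Compares two patches, checking the diffs (changes of one file in a patch).
--   This expects the patches to be in the diff map form mentioned above"""
--   if len(a) != len(b):
--     return False
--
--   try:
--     for diff in a:
--       if len(a[diff]) != len(b[diff]):
--         return False
--
--       for i in range(0, len(a[diff])):
--         if a[diff][i].strip() != b[diff][i].strip():
--           return False
--   except:
--     return False
--
--   return True
-- ===== SOURCE B (Python) =====
-- def compare_diffs(a, b):
--   """Compares two patches, checking the diffs (changes of one file in a patch).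
--   This expects the patches to be in the diff map form mentioned above"""
--   if len(a) != len(b):
--     return False
--   try:
--     norm_a = sorted((k, [line.strip() for line in a[k]]) for k in a)
--     norm_b = sorted((k, [line.strip() for line in b[k]]) for k in b)
--     return norm_a == norm_b
--   except:
--     return False
-- ===== Notes on version B (the rewrite author's own statement) =====
-- stated objective: simpler
-- what changed: Replaces the interleaved nested lookup/length/element-check loops by normalizing each map once (keys paired with stripped lines), sorting both normalized item lists and comparing them structurally in one equality.
import Mathlib
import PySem

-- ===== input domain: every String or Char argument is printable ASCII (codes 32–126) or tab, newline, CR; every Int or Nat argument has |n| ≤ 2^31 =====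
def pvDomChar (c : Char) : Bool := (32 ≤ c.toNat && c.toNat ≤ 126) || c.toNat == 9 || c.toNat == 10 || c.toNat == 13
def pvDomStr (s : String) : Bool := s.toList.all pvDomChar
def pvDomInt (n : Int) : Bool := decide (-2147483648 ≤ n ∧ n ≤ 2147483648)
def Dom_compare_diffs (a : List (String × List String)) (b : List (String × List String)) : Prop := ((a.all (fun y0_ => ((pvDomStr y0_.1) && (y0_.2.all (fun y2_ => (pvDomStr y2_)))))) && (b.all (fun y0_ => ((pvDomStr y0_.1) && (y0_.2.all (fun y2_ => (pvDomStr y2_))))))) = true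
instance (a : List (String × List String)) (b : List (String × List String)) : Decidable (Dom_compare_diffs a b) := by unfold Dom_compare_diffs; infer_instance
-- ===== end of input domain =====

-- B replaces A's interleaved nested lookup/length/element loops by normalizing each map once
-- (keys paired with stripped lines), sorting both normalized item lists and comparing them
-- in one structural equality; objective: simpler.

-- ===== PORT A =====
-- inner 'for i in range(0, len(a[diff]))' loop; an out-of-range index (IndexError) is
-- swallowed by A's bare 'except' into False, hence the catch-all false branch
def cdInner (va vb : List String) : List Int → Bool
  | [] => true
  | i :: rest =>
    match PySem.List.pyGet? va i, PySem.List.pyGet? vb i with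
    | some x, some y =>
      if PySem.Str.strip x ≠ PySem.Str.strip y then false else cdInner va vb rest
    | _, _ => false

-- outer 'for diff in a' loop; a key missing from b (KeyError) is caught by the bare 'except' → False
def cdOuter (db : PySem.Dict String (List String)) : List (String × List String) → Bool
  | [] => true
  | (k, va) :: rest =>
    match db.get? k with
    | none => false
    | some vb =>
      if va.length ≠ vb.length then false
      else if cdInner va vb (PySem.List.pyRange 0 (va.length : Int) 1) then cdOuter db rest
      else false

def compare_diffs (a : List (String × List String)) (b : List (String × List String)) : Bool :=
  let da := PySem.Dict.ofList a
  let db := PySem.Dict.ofList b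
  if da.size ≠ db.size then false
  else cdOuter db da.items

-- ===== PORT B =====
-- sorted((k, [line.strip() for line in d[k]]) for k in d): dict keys are unique, so Python's
-- tuple comparison is decided by the key alone — sorting by the first component is exact;
-- nothing inside Source B's try can raise on a well-typed dict, so no exceptional branch is needed
def pvNorm (d : PySem.Dict String (List String)) : List (String × List String) :=
  PySem.List.sorted (d.items.map (fun p => (p.1, p.2.map PySem.Str.strip))) (fun p => p.1)

def compare_diffs_alt (a : List (String × List String)) (b : List (String × List String)) : Bool :=
  let da := PySem.Dict.ofList a
  let db := PySem.Dict.ofList b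
  if da.size ≠ db.size then false
  else pvNorm da == pvNorm db

-- ===== PRECONDITION & SPEC =====
def Spec_compare_diffs (a : List (String × List String)) (b : List (String × List String)) (out : Bool) : Prop := out = compare_diffs_alt a b
instance (a : List (String × List String)) (b : List (String × List String)) (out : Bool) : Decidable (Spec_compare_diffs a b out) := by unfold Spec_compare_diffs; infer_instance

-- ===== CLAIM (what is proved, stated in full; the proofs are below) =====
def Claim_equal_compare_diffs : Prop := ∀ (a : List (String × List String)) (b : List (String × List String)), Dom_compare_diffs a b → Spec_compare_diffs a b (compare_diffs a b)

-- ===== LEMMAS AND PROOFS =====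

-- the normalized item list B sorts
def pvNormItems (d : PySem.Dict String (List String)) : List (String × List String) :=
  d.items.map (fun p => (p.1, p.2.map PySem.Str.strip))

theorem pvNorm_eq (d : PySem.Dict String (List String)) :
    pvNorm d = PySem.List.sorted (pvNormItems d) (fun p => p.1) := rfl

theorem cdInner_eq_true_iff (va vb : List String) (idxs : List Int) :
    cdInner va vb idxs = true ↔
      ∀ i ∈ idxs, ∃ x y, PySem.List.pyGet? va i = some x ∧ PySem.List.pyGet? vb i = some y ∧
        PySem.Str.strip x = PySem.Str.strip y := by
  induction idxs with
  | nil => simp [cdInner]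
  | cons i rest ih =>
    simp only [cdInner, List.mem_cons, forall_eq_or_imp]
    cases hva : PySem.List.pyGet? va i <;> cases hvb : PySem.List.pyGet? vb i <;> simp_all

theorem cdInner_range_fwd (va vb : List String)
    (h : va.length = vb.length)
    (H : ∀ i ∈ PySem.List.pyRange 0 (va.length : Int) 1,
      ∃ x y, PySem.List.pyGet? va i = some x ∧ PySem.List.pyGet? vb i = some y ∧
        PySem.Str.strip x = PySem.Str.strip y) :
    va.map PySem.Str.strip = vb.map PySem.Str.strip := by
  apply List.ext_getElem (by simp [h])
  intro k hk1 hk2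
  simp only [List.length_map] at hk1
  have := H (k : Int) (by rw [PySem.List.mem_pyRange_one]; constructor <;> omega)
  obtain ⟨x, y, hx, hy, hs⟩ := this
  rw [PySem.List.pyGet?_natCast] at hx hy
  simp only [List.getElem?_eq_getElem hk1, Option.some_inj] at hx
  simp only [List.getElem?_eq_getElem (show k < vb.length by omega), Option.some_inj] at hy
  rw [List.getElem_map, List.getElem_map, hx, hy]
  exact hs

theorem cdInner_range_rev (va vb : List String)
    (hmap : va.map PySem.Str.strip = vb.map PySem.Str.strip) :
    ∀ i ∈ PySem.List.pyRange 0 (va.length : Int) 1,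
      ∃ x y, PySem.List.pyGet? va i = some x ∧ PySem.List.pyGet? vb i = some y ∧
        PySem.Str.strip x = PySem.Str.strip y := by
  have h : va.length = vb.length := by
    have := congrArg List.length hmap; simpa using this
  intro i hi
  rw [PySem.List.mem_pyRange_one] at hi
  have h1 : PySem.List.pyGet? va i = some va[i.toNat] :=
    PySem.List.pyGet?_eq_some_getElem va hi.1 (by omega)
  have h2 : PySem.List.pyGet? vb i = some vb[i.toNat] :=
    PySem.List.pyGet?_eq_some_getElem vb hi.1 (by omega)
  refine ⟨_, _, h1, h2, ?_⟩
  have := congrArg (fun l => l[i.toNat]?) hmap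
  simp only [List.getElem?_map] at this
  have hk : i.toNat < va.length := by omega
  simpa [List.getElem?_eq_getElem hk,
    List.getElem?_eq_getElem (show i.toNat < vb.length by omega)] using this

theorem cdOuter_eq_true_iff (db : PySem.Dict String (List String))
    (items : List (String × List String)) :
    cdOuter db items = true ↔
      ∀ p ∈ items, ∃ vb, db.get? p.1 = some vb ∧
        p.2.map PySem.Str.strip = vb.map PySem.Str.strip := by
  induction items with
  | nil => simp [cdOuter]
  | cons hd rest ih =>
    obtain ⟨k, va⟩ := hd
    simp only [cdOuter, List.mem_cons, forall_eq_or_imp]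
    cases hget : db.get? k with
    | none => simp
    | some vb =>
      simp only [Option.some_inj]
      constructor
      · intro hall
        by_cases hlen : va.length = vb.length
        · rw [if_neg (by simp [hlen])] at hall
          by_cases hin : cdInner va vb (PySem.List.pyRange 0 (va.length : Int) 1) = true
          · rw [if_pos hin] at hall
            exact ⟨⟨vb, rfl, cdInner_range_fwd va vb hlen ((cdInner_eq_true_iff _ _ _).mp hin)⟩,
              ih.mp hall⟩
          · rw [if_neg hin] at hall
            exact absurd hall (by simp)
        · rw [if_pos (by simp [hlen])] at hall
          exact absurd hall (by simp)
      · rintro ⟨⟨vb2, hvb2, hmap⟩, hrest⟩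
        cases hvb2
        have hlen : va.length = vb.length := by simpa using congrArg List.length hmap
        have hin := (cdInner_eq_true_iff va vb _).mpr (cdInner_range_rev va vb hmap)
        rw [if_neg (by simp [hlen]), if_pos hin]
        exact ih.mpr hrest

theorem nodup_pvNormItems (d : PySem.Dict String (List String)) (h : d.keys.Nodup) :
    (pvNormItems d).Nodup := by
  have hmap : (pvNormItems d).map Prod.fst = d.keys := by
    simp [pvNormItems, PySem.Dict.keys, List.map_map, Function.comp_def]
  exact List.Nodup.of_map Prod.fst (hmap ▸ h)

theorem map_fst_pvNormItems (d : PySem.Dict String (List String)) :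
    (pvNormItems d).map Prod.fst = d.keys := by
  simp [pvNormItems, PySem.Dict.keys, List.map_map, Function.comp_def]

theorem main_iff (da db : PySem.Dict String (List String))
    (ha : da.keys.Nodup) (hb : db.keys.Nodup) (hs : da.size = db.size) :
    (∀ p ∈ da.items, ∃ vb, db.get? p.1 = some vb ∧
        p.2.map PySem.Str.strip = vb.map PySem.Str.strip) ↔ pvNorm da = pvNorm db := by
  have hlen : (pvNormItems da).length = (pvNormItems db).length := by
    simpa [pvNormItems, PySem.Dict.size] using hs
  constructor
  · intro H
    have hsub : pvNormItems da ⊆ pvNormItems db := by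
      intro q hq
      simp only [pvNormItems, List.mem_map] at hq
      obtain ⟨p, hp, rfl⟩ := hq
      obtain ⟨vb, hget, hmap⟩ := H p hp
      have : (p.1, vb) ∈ db.items := PySem.Dict.mem_items_of_get?_eq_some db hget
      exact List.mem_map.mpr ⟨(p.1, vb), this, by simp [hmap]⟩
    have hperm : (pvNormItems da).Perm (pvNormItems db) :=
      (List.subperm_of_subset (nodup_pvNormItems da ha) hsub).perm_of_length_le (by omega)
    have hperm2 : (pvNorm db).Perm (pvNormItems da) :=
      (PySem.List.sorted_perm _ _ _).trans hperm.symm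
    have hfstnd : ((pvNorm db).map Prod.fst).Nodup := by
      have : ((pvNorm db).map Prod.fst).Perm db.keys :=
        (((PySem.List.sorted_perm (pvNormItems db) (fun p => p.1) false)).map Prod.fst).trans
          (map_fst_pvNormItems db ▸ List.Perm.refl _)
      exact this.nodup_iff.mpr hb
    have hle : (pvNorm db).Pairwise (fun p q : String × List String => p.1 ≤ q.1) :=
      PySem.List.sorted_pairwise _ _
    have hne : (pvNorm db).Pairwise (fun p q : String × List String => p.1 ≠ q.1) :=
      List.pairwise_map.mp hfstnd
    have hlt : (pvNorm db).Pairwise (fun p q : String × List String => p.1 < q.1) :=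
      (hle.and hne).imp (fun h => lt_of_le_of_ne h.1 h.2)
    exact PySem.List.sorted_eq_of_perm_of_pairwise_lt _ _ _ hperm2 hlt
  · intro H p hp
    have hperm : (pvNormItems da).Perm (pvNormItems db) := by
      have h1 := PySem.List.sorted_perm (pvNormItems da) (fun p => p.1) false
      have h2 := PySem.List.sorted_perm (pvNormItems db) (fun p => p.1) false
      rw [← pvNorm_eq] at h1 h2
      exact h1.symm.trans (H ▸ h2)
    have hmem : (p.1, p.2.map PySem.Str.strip) ∈ pvNormItems db :=
      hperm.mem_iff.mp (List.mem_map.mpr ⟨p, hp, rfl⟩)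
    simp only [pvNormItems, List.mem_map] at hmem
    obtain ⟨q, hq, heq⟩ := hmem
    simp only [Prod.mk.injEq] at heq
    obtain ⟨h1, h2⟩ := heq
    refine ⟨q.2, ?_, h2.symm⟩
    rw [← h1]
    exact PySem.Dict.get?_of_mem_items db (by simpa using hq) hb

-- ===== VERDICT (by name: the statement is the Claim_ definition above) =====
theorem compare_diffs_spec : Claim_equal_compare_diffs := by
  intro a b _
  unfold Spec_compare_diffs compare_diffs compare_diffs_alt
  simp only []
  by_cases hs : (PySem.Dict.ofList a).size = (PySem.Dict.ofList b).size
  · simp only [hs, ne_eq, not_true_eq_false, if_false]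
    rw [Bool.eq_iff_iff, cdOuter_eq_true_iff, beq_iff_eq]
    exact main_iff _ _ (PySem.Dict.nodup_keys_ofList a) (PySem.Dict.nodup_keys_ofList b) hs
  · simp [hs]
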